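-- pv_equiv track=rewrite | github.com/ksahlin/isONcorrect | src/isoncorrect/isONcorrect.py | fix_correction
-- ===== SOURCE A (Python) =====
-- def fix_correction(orig, corr):
--     seq = []
--     o_segm = []
--     c_segm = []
--     l = 0
--     for o, c in zip(orig,corr):
--         if o != '-' and c != '-':
--             if l > 10: # take original read segment
--                 seq.append( ''.join([x for x in o_segm if x != '-']) )
--             elif l > 0: # take corrected read segment
--                 seq.append( ''.join([x for x in c_segm if x != '-']) )
--             seq.append(c)
--             l=0
--             o_segm = []
--             c_segm = []
--         elif o == '-':
--             c_segm.append(c)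
--             l += 1
--         elif c == '-':
--             o_segm.append(o)
--             l += 1
--         else:
--             raise("Parsing alignment error of parasail's alignment")
--
--     # if ending in an indel
--     if l > 10: # take original read segment
--         seq.append( ''.join([x for x in o_segm if x != '-']) )
--     elif l > 0: # take corrected read segment
--         seq.append( ''.join([x for x in c_segm if x != '-']) )
--     l=0
--     o_segm = []
--     c_segm = []
--     return ''.join([s for s in seq])
-- ===== SOURCE B (Python) =====
-- def fix_correction(orig, corr):
--     # Split aligned columns into maximal match/indel runs, then emit one piece per run.
--     cols = list(zip(orig, corr))
--     n = len(cols)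
--     out = []
--     i = 0
--     while i < n:
--         ismatch = cols[i][0] != '-' and cols[i][1] != '-'
--         j = i + 1
--         while j < n and (cols[j][0] != '-' and cols[j][1] != '-') == ismatch:
--             j += 1
--         g = cols[i:j]
--         if ismatch:
--             out.append(''.join(c for _, c in g))
--         elif j - i > 10:  # long indel run: keep the original read's characters
--             out.append(''.join(o for o, _ in g if o != '-'))
--         else:             # short indel run: keep the corrected characters
--             out.append(''.join(c for _, c in g if c != '-'))
--         i = j
--     return ''.join(out)
-- ===== Notes on version B (the rewrite author's own statement) =====
-- stated objective: alternative
-- what changed: Replaces A's single fold with running counter, two segment accumulators and flush-at-match logic by a two-level run-splitting pass: the aligned columns are cut into maximal match/indel runs and each run is emitted as one piece.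
import Mathlib
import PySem

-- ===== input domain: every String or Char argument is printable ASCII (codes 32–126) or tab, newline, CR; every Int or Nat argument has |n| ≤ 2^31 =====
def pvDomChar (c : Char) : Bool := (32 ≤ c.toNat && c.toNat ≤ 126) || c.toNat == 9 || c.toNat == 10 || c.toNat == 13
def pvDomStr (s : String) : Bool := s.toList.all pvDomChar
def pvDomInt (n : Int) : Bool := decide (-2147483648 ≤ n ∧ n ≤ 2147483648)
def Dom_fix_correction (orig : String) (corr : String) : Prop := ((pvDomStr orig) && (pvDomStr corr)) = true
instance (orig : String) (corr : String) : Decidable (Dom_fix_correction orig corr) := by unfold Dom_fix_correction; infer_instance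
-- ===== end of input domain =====

-- B replaces A's single fold (running counter + two accumulators + flush-at-match) by a
-- two-level pass that splits the aligned columns into maximal match/indel runs and emits
-- one piece per run; equal return values on all inputs (objective: alternative).


-- ===== PORT A =====
-- state = (seq, o_segm, c_segm, l); strings in seq kept as List Char, ''.join = flatten
def fcStep (st : List (List Char) × List Char × List Char × Nat) (oc : Char × Char) :
    List (List Char) × List Char × List Char × Nat :=
  match st, oc with
  | (seq, os, cs, l), (o, c) =>
    if o ≠ '-' ∧ c ≠ '-' then
      (((if l > 10 then seq ++ [os.filter (· ≠ '-')]
         else if l > 0 then seq ++ [cs.filter (· ≠ '-')]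
         else seq) ++ [[c]]), [], [], 0)
    else if o = '-' then (seq, os, cs ++ [c], l + 1)
    else (seq, os ++ [o], cs, l + 1)
    -- the Python 'else: raise' branch is unreachable: a column with o = '-' and c = '-'
    -- is taken by the 'elif o == "-"' branch

def fcFlush (st : List (List Char) × List Char × List Char × Nat) : List (List Char) :=
  match st with
  | (seq, os, cs, l) =>
    if l > 10 then seq ++ [os.filter (· ≠ '-')]
    else if l > 0 then seq ++ [cs.filter (· ≠ '-')]
    else seq

def fix_correction (orig : String) (corr : String) : String :=
  String.ofList (fcFlush ((orig.toList.zip corr.toList).foldl fcStep ([], [], [], 0))).flatten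

-- ===== PORT B =====
def pvKey (x : Char × Char) : Bool := x.1 != '-' && x.2 != '-'

def fcEmit (m : Bool) (g : List (Char × Char)) : List Char :=
  if m then g.map Prod.snd
  else if g.length > 10 then (g.filter (fun x => x.1 != '-')).map Prod.fst
  else (g.filter (fun x => x.2 != '-')).map Prod.snd

-- the inner while loop of Source B: extend the run while the key stays the same
def fcRuns : List (Char × Char) → List Char
  | [] => []
  | x :: xs =>
    fcEmit (pvKey x) (x :: xs.takeWhile (fun y => pvKey y == pvKey x)) ++
      fcRuns (xs.dropWhile (fun y => pvKey y == pvKey x))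
termination_by l => l.length
decreasing_by
  simp only [List.length_cons]
  exact Nat.lt_succ_of_le (List.length_dropWhile_le _ _)

def fix_correction_alt (orig : String) (corr : String) : String :=
  String.ofList (fcRuns (orig.toList.zip corr.toList))

-- ===== PRECONDITION & SPEC =====
def Spec_fix_correction (orig : String) (corr : String) (out : String) : Prop := out = fix_correction_alt orig corr
instance (orig : String) (corr : String) (out : String) : Decidable (Spec_fix_correction orig corr out) := by unfold Spec_fix_correction; infer_instance

-- ===== CLAIM (what is proved, stated in full; the proofs are below) =====
def Claim_equal_fix_correction : Prop := ∀ (orig : String) (corr : String), Dom_fix_correction orig corr → Spec_fix_correction orig corr (fix_correction orig corr)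

-- ===== LEMMAS AND PROOFS =====

-- a match-run head peels off one output character
lemma fcRuns_cons_match (x : Char × Char) (xs : List (Char × Char)) (hx : pvKey x = true) :
    fcRuns (x :: xs) = x.2 :: fcRuns xs := by
  rw [fcRuns]
  cases xs with
  | nil => simp [fcEmit, hx]
  | cons y ys =>
    by_cases hy : pvKey y = true
    · conv_rhs => rw [fcRuns]
      simp [fcEmit, hx, hy, List.takeWhile, List.dropWhile]
    · simp at hy
      simp [fcEmit, hx, hy, List.takeWhile, List.dropWhile]

-- folding A's step across an all-indel block accumulates the two segments and the counter
lemma foldl_indel_block (g : List (Char × Char)) (hg : ∀ x ∈ g, pvKey x = false) :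
    ∀ (rest : List (Char × Char)) (seq : List (List Char)) (os cs : List Char) (l : Nat),
    (g ++ rest).foldl fcStep (seq, os, cs, l) =
      rest.foldl fcStep (seq, os ++ (g.filter (fun x => x.1 != '-')).map Prod.fst,
        cs ++ (g.filter (fun x => x.1 == '-')).map Prod.snd, l + g.length) := by
  induction g with
  | nil => intro rest seq os cs l; simp
  | cons x xs ih =>
    intro rest seq os cs l
    have hx : pvKey x = false := hg x (by simp)
    have hxs : ∀ y ∈ xs, pvKey y = false := fun y hy => hg y (by simp [hy])
    simp only [pvKey, Bool.and_eq_false_iff,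
      bne_eq_false_iff_eq] at hx
    obtain ⟨o, c⟩ := x
    by_cases ho : o = '-'
    · simp only [List.cons_append, List.foldl_cons, fcStep, ho]
      rw [ih hxs]
      simp [List.filter_cons, ho, Nat.add_comm, Nat.add_assoc, Nat.add_left_comm]
    · have hc : c = '-' := by
        rcases hx with h | h
        · simp at h; exact absurd h ho
        · simpa using h
      simp only [List.cons_append, List.foldl_cons, fcStep, ho, hc]
      rw [ih hxs]
      simp [List.filter_cons, ho, hc, Nat.add_comm, Nat.add_assoc, Nat.add_left_comm]

-- A's flushed original segment equals B's: the collected chars are already ≠ '-'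
lemma orig_segment_eq (g : List (Char × Char)) :
    ((g.filter (fun x => x.1 != '-')).map Prod.fst).filter (fun c => c ≠ '-') =
      (g.filter (fun x => x.1 != '-')).map Prod.fst := by
  rw [List.filter_eq_self]
  intro c hc
  simp only [List.mem_map, List.mem_filter, bne_iff_ne] at hc
  obtain ⟨x, ⟨_, hx⟩, rfl⟩ := hc
  simpa using hx

-- A's flushed corrected segment equals B's on an all-indel run
lemma corr_segment_eq (g : List (Char × Char)) (hg : ∀ x ∈ g, pvKey x = false) :
    ((g.filter (fun x => x.1 == '-')).map Prod.snd).filter (fun c => c ≠ '-') =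
      (g.filter (fun x => x.2 != '-')).map Prod.snd := by
  induction g with
  | nil => simp
  | cons x xs ih =>
    have hx : pvKey x = false := hg x (by simp)
    have hxs : ∀ y ∈ xs, pvKey y = false := fun y hy => hg y (by simp [hy])
    simp only [pvKey, Bool.and_eq_false_iff,
      bne_eq_false_iff_eq] at hx
    obtain ⟨o, c⟩ := x
    have ih' := ih hxs
    simp only [decide_not] at ih'
    by_cases ho : o = '-'
    · by_cases hc : c = '-' <;> simp [List.filter_cons, ho, hc, ih']
    · have hc : c = '-' := by
        rcases hx with h | h
        · simp at h; exact absurd h ho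
        · simpa using h
      simp [List.filter_cons, ho, hc, ih']

-- the element after a dropped prefix fails the predicate
lemma dropWhile_cons_head {α : Type} (p : α → Bool) :
    ∀ (xs : List α) (y : α) (ys : List α), xs.dropWhile p = y :: ys → p y = false := by
  intro xs
  induction xs with
  | nil => simp [List.dropWhile]
  | cons a as ih =>
    intro y ys h
    by_cases hpa : p a = true
    · rw [List.dropWhile_cons_of_pos hpa] at h; exact ih _ _ h
    · rw [List.dropWhile_cons_of_neg (by simpa using hpa)] at h
      cases h; simpa using hpa

-- main invariant: with empty accumulators, the flushed fold over cols appends fcRuns cols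
lemma main_inv : ∀ (n : Nat) (cols : List (Char × Char)), cols.length ≤ n →
    ∀ (seq : List (List Char)),
    (fcFlush (cols.foldl fcStep (seq, [], [], 0))).flatten = seq.flatten ++ fcRuns cols := by
  intro n
  induction n with
  | zero =>
    intro cols hlen seq
    have : cols = [] := List.eq_nil_of_length_eq_zero (Nat.le_zero.mp hlen)
    subst this
    simp [fcFlush, fcRuns]
  | succ m ih =>
    intro cols hlen seq
    cases cols with
    | nil => simp [fcFlush, fcRuns]
    | cons x xs =>
      by_cases hx : pvKey x = true
      · -- match column: one step, no flush (l = 0)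
        have hx' : x.1 ≠ '-' ∧ x.2 ≠ '-' := by
          simp only [pvKey, Bool.and_eq_true, bne_iff_ne] at hx; exact hx
        obtain ⟨o, c⟩ := x
        simp only [List.foldl_cons, fcStep, if_pos hx']
        rw [if_neg (by omega), if_neg (by omega)]
        rw [ih xs (by have h := hlen; simp at h; omega)]
        rw [fcRuns_cons_match (o, c) xs hx]
        simp
      · -- indel column: consume the whole indel run
        simp only [Bool.not_eq_true] at hx
        obtain ⟨g, rest, hgdef, hrest⟩ :
            ∃ g rest, g = x :: xs.takeWhile (fun z => pvKey z == false) ∧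
              rest = xs.dropWhile (fun z => pvKey z == false) := ⟨_, _, rfl, rfl⟩
        have hsplit : x :: xs = g ++ rest := by
          rw [hgdef, hrest]; simp
        have hgkeys : ∀ y ∈ g, pvKey y = false := by
          rw [hgdef]; intro y hy
          rcases List.mem_cons.mp hy with rfl | hy
          · exact hx
          · simpa using List.mem_takeWhile_imp hy
        have hglen : 0 < g.length := by rw [hgdef]; simp
        have hxslen : xs.length ≤ m := by have h := hlen; simp at h; omega
        have hrunsx : fcRuns (g ++ rest) = fcEmit false g ++ fcRuns rest := by
          rw [← hsplit, fcRuns, hx, ← hgdef, ← hrest]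
        rw [hsplit, foldl_indel_block g hgkeys, hrunsx]
        cases rest with
        | nil =>
          simp only [List.foldl_nil, fcFlush, fcRuns, Nat.zero_add, List.nil_append,
            List.append_nil]
          by_cases hlong : g.length > 10
          · rw [if_pos hlong, orig_segment_eq]
            simp [fcEmit, hlong]
          · rw [if_neg hlong, if_pos hglen, corr_segment_eq g hgkeys]
            simp [fcEmit, hlong]
        | cons y ys =>
          obtain ⟨o, c⟩ := y
          have hyk : pvKey (o, c) = true := by
            simpa using dropWhile_cons_head (fun z => pvKey z == false) xs _ _ hrest.symm
          have hy' : o ≠ '-' ∧ c ≠ '-' := by simpa [pvKey] using hyk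
          have hys : ys.length ≤ m := by
            have h1 := List.length_dropWhile_le (fun z => pvKey z == false) xs
            rw [← hrest] at h1; simp at h1; omega
          simp only [List.foldl_cons, fcStep, Nat.zero_add, List.nil_append]
          rw [if_pos hy']
          by_cases hlong : g.length > 10
          · rw [if_pos hlong, ih ys hys, fcRuns_cons_match (o, c) ys hyk, orig_segment_eq]
            simp [fcEmit, hlong]
          · rw [if_neg hlong, if_pos hglen, ih ys hys, fcRuns_cons_match (o, c) ys hyk,
              corr_segment_eq g hgkeys]
            simp [fcEmit, hlong]

-- ===== VERDICT (by name: the statement is the Claim_ definition above) =====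
theorem fix_correction_spec : Claim_equal_fix_correction := by
  intro orig corr _
  unfold Spec_fix_correction fix_correction fix_correction_alt
  rw [main_inv (orig.toList.zip corr.toList).length _ le_rfl []]
  simp
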